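-- pv_equiv track=rewrite | github.com/WhiteBear2021/pythonProject | 알고리즘withPy/Test/210814Toss/prob_06.py | solution
-- ===== SOURCE A (Python) =====
-- def solution(numOfStairs):
--     d=[0]*(numOfStairs+1)
--     d[1]=1
--     d[2]=2
--     d[3]=4
--     d[4]=7
--     for i in range(5,numOfStairs+1):
--         d[i]=d[i-1]+d[i-2]+d[i-3]
--     answer = d[numOfStairs]
--     return answer
-- ===== SOURCE B (Python) =====
-- def solution(numOfStairs):
--     # binary exponentiation of the 3x3 companion matrix of the tribonacci recurrence
--     def mul(X, Y):
--         return [[X[i][0] * Y[0][j] + X[i][1] * Y[1][j] + X[i][2] * Y[2][j]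
--                  for j in range(3)] for i in range(3)]
--     R = [[1, 0, 0], [0, 1, 0], [0, 0, 1]]
--     M = [[1, 1, 1], [1, 0, 0], [0, 1, 0]]
--     e = numOfStairs - 4
--     while e > 0:
--         if e & 1:
--             R = mul(R, M)
--         M = mul(M, M)
--         e >>= 1
--     # [t(n), t(n-1), t(n-2)] = R @ [t(4), t(3), t(2)] = R @ [7, 4, 2]
--     return R[0][0] * 7 + R[0][1] * 4 + R[0][2] * 2
-- ===== Notes on version B (the rewrite author's own statement) =====
-- stated objective: alternative
-- what changed: Replaced the DP array filling the tribonacci recurrence index by index with binary (square-and-multiply) exponentiation of its 3x3 companion matrix.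
-- outside the precondition, e.g. on solution(3): A raises IndexError, B returns 7
import Mathlib
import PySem

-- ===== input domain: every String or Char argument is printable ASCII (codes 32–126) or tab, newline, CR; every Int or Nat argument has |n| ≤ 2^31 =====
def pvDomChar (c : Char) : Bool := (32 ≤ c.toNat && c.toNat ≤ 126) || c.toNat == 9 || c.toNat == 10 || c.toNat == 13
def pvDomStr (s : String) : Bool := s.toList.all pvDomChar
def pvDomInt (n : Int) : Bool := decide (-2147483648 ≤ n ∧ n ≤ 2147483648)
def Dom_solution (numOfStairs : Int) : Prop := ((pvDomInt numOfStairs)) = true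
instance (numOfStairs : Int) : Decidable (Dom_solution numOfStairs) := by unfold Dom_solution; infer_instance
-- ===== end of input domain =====

-- B replaces A's DP-array loop by binary exponentiation of the 3x3 companion matrix of the recurrence (alternative algorithm; fewer big-int additions, speed not confirmed).

-- ===== PORT A =====
-- literal port: d = [0]*(n+1); d[1..4] := 1,2,4,7; for i in range(5, n+1): d[i] = d[i-1]+d[i-2]+d[i-3]; return d[n]
-- (under Pre_solution, 4 ≤ n, every index is non-negative and in range, so List.set/List.getD are exact)
def solution (numOfStairs : Int) : Int :=
  let d : List Int := List.replicate (numOfStairs + 1).toNat 0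
  let d := d.set 1 1
  let d := d.set 2 2
  let d := d.set 3 4
  let d := d.set 4 7
  let d := (PySem.List.pyRange 5 (numOfStairs + 1) 1).foldl
    (fun d i =>
      d.set i.toNat (d.getD (i - 1).toNat 0 + d.getD (i - 2).toNat 0 + d.getD (i - 3).toNat 0)) d
  d.getD numOfStairs.toNat 0

-- ===== PORT B =====
-- a 3x3 integer matrix as three rows of triples
abbrev PvMat : Type := (Int × Int × Int) × (Int × Int × Int) × (Int × Int × Int)

-- mul(X, Y) of Source B, with the three-term sums written out exactly as there
def pvMatMul (X Y : PvMat) : PvMat :=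
  ((X.1.1 * Y.1.1 + X.1.2.1 * Y.2.1.1 + X.1.2.2 * Y.2.2.1,
    X.1.1 * Y.1.2.1 + X.1.2.1 * Y.2.1.2.1 + X.1.2.2 * Y.2.2.2.1,
    X.1.1 * Y.1.2.2 + X.1.2.1 * Y.2.1.2.2 + X.1.2.2 * Y.2.2.2.2),
   (X.2.1.1 * Y.1.1 + X.2.1.2.1 * Y.2.1.1 + X.2.1.2.2 * Y.2.2.1,
    X.2.1.1 * Y.1.2.1 + X.2.1.2.1 * Y.2.1.2.1 + X.2.1.2.2 * Y.2.2.2.1,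
    X.2.1.1 * Y.1.2.2 + X.2.1.2.1 * Y.2.1.2.2 + X.2.1.2.2 * Y.2.2.2.2),
   (X.2.2.1 * Y.1.1 + X.2.2.2.1 * Y.2.1.1 + X.2.2.2.2 * Y.2.2.1,
    X.2.2.1 * Y.1.2.1 + X.2.2.2.1 * Y.2.1.2.1 + X.2.2.2.2 * Y.2.2.2.1,
    X.2.2.1 * Y.1.2.2 + X.2.2.2.1 * Y.2.1.2.2 + X.2.2.2.2 * Y.2.2.2.2))

-- the 'while e > 0' square-and-multiply loop of Source B (e & 1 = e % 2, e >>= 1 = e / 2 on the non-negative e)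
def pvPowLoop (R M : PvMat) (e : Nat) : PvMat :=
  if e = 0 then R
  else pvPowLoop (if e % 2 = 1 then pvMatMul R M else R) (pvMatMul M M) (e / 2)

def solution_alt (numOfStairs : Int) : Int :=
  let R := pvPowLoop ((1, 0, 0), (0, 1, 0), (0, 0, 1)) ((1, 1, 1), (1, 0, 0), (0, 1, 0))
    (numOfStairs - 4).toNat
  R.1.1 * 7 + R.1.2.1 * 4 + R.1.2.2 * 2

-- ===== PRECONDITION & SPEC =====
-- Python A raises IndexError for numOfStairs ≤ 3 (the seed writes d[1]..d[4] into a list of length numOfStairs+1)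
def Pre_solution (numOfStairs : Int) : Prop := 4 ≤ numOfStairs
instance (numOfStairs : Int) : Decidable (Pre_solution numOfStairs) := by unfold Pre_solution; infer_instance
def pvWitness_solution : Int := (10)
def Spec_solution (numOfStairs : Int) (out : Int) : Prop := out = solution_alt numOfStairs
instance (numOfStairs : Int) (out : Int) : Decidable (Spec_solution numOfStairs out) := by unfold Spec_solution; infer_instance

-- ===== CLAIM (what is proved, stated in full; the proofs are below) =====
def Claim_equal_solution : Prop := ∀ (numOfStairs : Int), Dom_solution numOfStairs → Pre_solution numOfStairs → Spec_solution numOfStairs (solution numOfStairs)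

-- ===== LEMMAS AND PROOFS =====

-- the mathematical sequence both programs compute
def Trib : Nat → Int
  | 0 => 0
  | 1 => 1
  | 2 => 2
  | 3 => 4
  | (k + 4) => Trib (k + 3) + Trib (k + 2) + Trib (k + 1)

def pvI : PvMat := ((1, 0, 0), (0, 1, 0), (0, 0, 1))
def pvM0 : PvMat := ((1, 1, 1), (1, 0, 0), (0, 1, 0))

def pvNatPow (M : PvMat) : Nat → PvMat
  | 0 => pvI
  | (k + 1) => pvMatMul (pvNatPow M k) M

lemma pvMatMul_assoc (X Y Z : PvMat) : pvMatMul (pvMatMul X Y) Z = pvMatMul X (pvMatMul Y Z) := by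
  obtain ⟨⟨a, b, c⟩, ⟨d, e, f⟩, ⟨g, h, i⟩⟩ := X
  obtain ⟨⟨a', b', c'⟩, ⟨d', e', f'⟩, ⟨g', h', i'⟩⟩ := Y
  obtain ⟨⟨a'', b'', c''⟩, ⟨d'', e'', f''⟩, ⟨g'', h'', i''⟩⟩ := Z
  simp only [pvMatMul, Prod.mk.injEq]
  refine ⟨⟨by ring, by ring, by ring⟩, ⟨by ring, by ring, by ring⟩, by ring, by ring, by ring⟩

lemma pvMatMul_one_left (M : PvMat) : pvMatMul pvI M = M := by
  obtain ⟨⟨a, b, c⟩, ⟨d, e, f⟩, ⟨g, h, i⟩⟩ := M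
  simp [pvMatMul, pvI]

lemma pvMatMul_one_right (M : PvMat) : pvMatMul M pvI = M := by
  obtain ⟨⟨a, b, c⟩, ⟨d, e, f⟩, ⟨g, h, i⟩⟩ := M
  simp [pvMatMul, pvI]

lemma pvNatPow_succ_left (M : PvMat) (k : Nat) :
    pvNatPow M (k + 1) = pvMatMul M (pvNatPow M k) := by
  induction k with
  | zero => simp [pvNatPow, pvMatMul_one_left, pvMatMul_one_right]
  | succ k ih =>
    calc pvNatPow M (k + 1 + 1) = pvMatMul (pvNatPow M (k + 1)) M := rfl
    _ = pvMatMul (pvMatMul M (pvNatPow M k)) M := by rw [ih]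
    _ = pvMatMul M (pvNatPow M (k + 1)) := by rw [pvMatMul_assoc]; rfl

lemma pvNatPow_sq (M : PvMat) (k : Nat) :
    pvNatPow (pvMatMul M M) k = pvNatPow M (2 * k) := by
  induction k with
  | zero => rfl
  | succ k ih =>
    have h2 : 2 * (k + 1) = 2 * k + 1 + 1 := by ring
    rw [h2]
    calc pvNatPow (pvMatMul M M) (k + 1)
        = pvMatMul (pvNatPow M (2 * k)) (pvMatMul M M) := by rw [← ih]; rfl
    _ = pvMatMul (pvMatMul (pvNatPow M (2 * k)) M) M := by rw [pvMatMul_assoc]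
    _ = pvNatPow M (2 * k + 1 + 1) := rfl

lemma pvPowLoop_eq (e : Nat) : ∀ (R M : PvMat), pvPowLoop R M e = pvMatMul R (pvNatPow M e) := by
  induction e using Nat.strong_induction_on with
  | _ e ih =>
    intro R M
    rw [pvPowLoop]
    by_cases h0 : e = 0
    · simp [h0, pvNatPow, pvMatMul_one_right]
    · have hlt : e / 2 < e := Nat.div_lt_self (Nat.pos_of_ne_zero h0) (by norm_num)
      rw [if_neg h0, ih _ hlt, pvNatPow_sq]
      by_cases hpar : e % 2 = 1
      · have he : e = 2 * (e / 2) + 1 := by omega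
        rw [if_pos hpar, pvMatMul_assoc, ← pvNatPow_succ_left,
          show 2 * (e / 2) + 1 = e by omega]
      · have he : 2 * (e / 2) = e := by omega
        rw [if_neg hpar, he]

def pvRowVal (r : Int × Int × Int) : Int := r.1 * 7 + r.2.1 * 4 + r.2.2 * 2

lemma pvNatPow_rows (e : Nat) :
    pvRowVal (pvNatPow pvM0 e).1 = Trib (e + 4) ∧
    pvRowVal (pvNatPow pvM0 e).2.1 = Trib (e + 3) ∧
    pvRowVal (pvNatPow pvM0 e).2.2 = Trib (e + 2) := by
  induction e with
  | zero => refine ⟨?_, ?_, ?_⟩ <;> simp [pvNatPow, pvI, pvRowVal, Trib]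
  | succ e ih =>
    obtain ⟨h1, h2, h3⟩ := ih
    rw [pvNatPow_succ_left]
    obtain ⟨hp, hP⟩ : ∃ P : PvMat, pvNatPow pvM0 e = P := ⟨_, rfl⟩
    rw [hP] at h1 h2 h3 ⊢
    obtain ⟨⟨a, b, c⟩, ⟨d, f, g⟩, ⟨h, i, j⟩⟩ := hp
    simp only [pvMatMul, pvM0, pvRowVal] at h1 h2 h3 ⊢
    have ht : Trib (e + 1 + 4) = Trib (e + 4) + Trib (e + 3) + Trib (e + 2) := rfl
    refine ⟨?_, ?_, ?_⟩
    · rw [ht, ← h1, ← h2, ← h3]; ring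
    · rw [show e + 1 + 3 = e + 4 from rfl, ← h1]; ring
    · rw [show e + 1 + 2 = e + 3 from rfl, ← h2]; ring

lemma solution_alt_eq_trib (n : Int) (hn : 4 ≤ n) : solution_alt n = Trib n.toNat := by
  have he : (n - 4).toNat + 4 = n.toNat := by omega
  have := (pvNatPow_rows (n - 4).toNat).1
  rw [he] at this
  simp only [solution_alt, pvPowLoop_eq]
  show pvRowVal (pvMatMul pvI (pvNatPow pvM0 (n - 4).toNat)).1 = Trib n.toNat
  rw [pvMatMul_one_left, this]

-- ===== A side: the DP loop computes Trib =====

def pvStep (d : List Int) (i : Int) : List Int :=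
  d.set i.toNat (d.getD (i - 1).toNat 0 + d.getD (i - 2).toNat 0 + d.getD (i - 3).toNat 0)

lemma pvLoopA (L : Nat) (m : Nat) (hm : 4 ≤ m) (hL : m < L) :
    ∀ (d : List Int), d.length = L → (∀ j, j ≤ 4 → d.getD j 0 = Trib j) →
    ((PySem.List.pyRange 5 ((m : Int) + 1) 1).foldl pvStep d).length = L ∧
    (∀ j, j ≤ m → ((PySem.List.pyRange 5 ((m : Int) + 1) 1).foldl pvStep d).getD j 0 = Trib j) := by
  induction m, hm using Nat.le_induction with
  | base =>
    intro d hlen hinit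
    rw [show ((4 : Nat) : Int) + 1 = 5 from rfl, PySem.List.pyRange_one_eq_nil (le_refl 5)]
    exact ⟨hlen, fun j hj => hinit j hj⟩
  | succ m hm ih =>
    intro d hlen hinit
    have hrng : PySem.List.pyRange 5 ((↑(m + 1) : Int) + 1) 1
        = PySem.List.pyRange 5 ((m : Int) + 1) 1 ++ [(m : Int) + 1] := by
      have : ((↑(m + 1) : Int) + 1) = ((m : Int) + 1) + 1 := by push_cast; ring
      rw [this, PySem.List.pyRange_one_succ_right (by omega)]
    obtain ⟨ihl, ihv⟩ := ih (by omega) d hlen hinit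
    rw [hrng, List.foldl_append, List.foldl_cons, List.foldl_nil]
    obtain ⟨k, rfl⟩ : ∃ k, m = k + 4 := ⟨m - 4, by omega⟩
    set d' := (PySem.List.pyRange 5 ((↑(k + 4) : Int) + 1) 1).foldl pvStep d with hd'
    have hidx : ((↑(k + 4) : Int) + 1).toNat = k + 5 := by omega
    have hi1 : ((↑(k + 4) : Int) + 1 - 1).toNat = k + 4 := by omega
    have hi2 : ((↑(k + 4) : Int) + 1 - 2).toNat = k + 3 := by omega
    have hi3 : ((↑(k + 4) : Int) + 1 - 3).toNat = k + 2 := by omega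
    have hval : pvStep d' ((↑(k + 4) : Int) + 1)
        = d'.set (k + 5) (Trib (k + 4) + Trib (k + 3) + Trib (k + 2)) := by
      rw [pvStep, hidx, hi1, hi2, hi3, ihv (k + 4) (by omega), ihv (k + 3) (by omega),
        ihv (k + 2) (by omega)]
    rw [hval]
    refine ⟨by simpa using ihl, fun j hj => ?_⟩
    by_cases hje : j = k + 5
    · subst hje
      rw [List.getD_eq_getElem?_getD, List.getElem?_set_self (by omega)]
      rfl
    · rw [List.getD_eq_getElem?_getD, List.getElem?_set_ne (by omega),
        ← List.getD_eq_getElem?_getD]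
      exact ihv j (by omega)

lemma solution_eq_trib (n : Int) (hn : 4 ≤ n) : solution n = Trib n.toNat := by
  obtain ⟨N, hN⟩ : ∃ N : Nat, n = (N : Int) := ⟨n.toNat, by omega⟩
  subst hN
  have h4 : 4 ≤ N := by omega
  have hlen1 : ((N : Int) + 1).toNat = N + 1 := by omega
  set d0 : List Int :=
    ((((List.replicate (N + 1) (0 : Int)).set 1 1).set 2 2).set 3 4).set 4 7 with hd0
  have hlen : d0.length = N + 1 := by simp [hd0]
  have hinit : ∀ j, j ≤ 4 → d0.getD j 0 = Trib j := by
    intro j hj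
    interval_cases j <;>
      simp [hd0, List.getD_eq_getElem?_getD, Trib, show 0 < N by omega, show 2 ≤ N by omega, show 3 ≤ N by omega,
        show 4 ≤ N by omega]
  have hmain := pvLoopA (N + 1) N h4 (by omega) d0 hlen hinit
  have hres := hmain.2 N (le_refl N)
  unfold solution
  simp only [hlen1, Int.toNat_natCast]
  exact hres

-- ===== VERDICT (by name: the statement is the Claim_ definition above) =====
theorem solution_spec : Claim_equal_solution := by
  intro n _ hpre
  unfold Spec_solution
  rw [solution_eq_trib n hpre, solution_alt_eq_trib n hpre]
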